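-- pv_equiv track=rewrite | github.com/Wulfic/Cicada3301 | Tools/p20_decode_non_primes.py | col_read_grid
-- ===== SOURCE A (Python) =====
-- def col_read_grid(values, rows, cols):
--     """Column-major reading of row-major filled grid"""
--     result = []
--     for c in range(cols):
--         for r in range(rows):
--             idx = r * cols + c
--             if idx < len(values):
--                 result.append(values[idx])
--     return result
-- ===== SOURCE B (Python) =====
-- def col_read_grid(values, rows, cols):
--     """Column-major reading of row-major filled grid"""
--     if cols <= 0:
--         return []
--     buckets = [[] for _ in range(min(cols, len(values)))]
--     for idx in range(len(values)):
--         r, c = divmod(idx, cols)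
--         if r < rows:
--             buckets[c].append(values[idx])
--     out = []
--     for col in buckets:
--         out.extend(col)
--     return out
-- ===== Notes on version B (the rewrite author's own statement) =====
-- stated objective: faster
-- what changed: Replaces the nested column-by-row coordinate enumeration (rows*cols iterations) with a single linear scatter pass over values into per-column buckets (via divmod) followed by concatenating the buckets.
import Mathlib
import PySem

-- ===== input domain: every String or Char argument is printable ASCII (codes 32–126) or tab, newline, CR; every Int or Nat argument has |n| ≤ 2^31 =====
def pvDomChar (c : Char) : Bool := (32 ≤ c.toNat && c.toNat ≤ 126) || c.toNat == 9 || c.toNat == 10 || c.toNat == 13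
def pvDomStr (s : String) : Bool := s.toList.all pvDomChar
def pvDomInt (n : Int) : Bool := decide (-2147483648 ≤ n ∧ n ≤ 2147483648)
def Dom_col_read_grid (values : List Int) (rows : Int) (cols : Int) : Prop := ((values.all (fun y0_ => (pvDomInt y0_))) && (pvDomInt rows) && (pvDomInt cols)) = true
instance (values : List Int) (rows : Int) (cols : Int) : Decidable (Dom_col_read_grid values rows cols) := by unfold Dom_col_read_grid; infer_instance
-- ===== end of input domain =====

-- B replaces A's nested column-by-row coordinate enumeration with one linear scatter
-- pass over `values` into per-column buckets (via divmod) followed by concatenation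
-- of the buckets; equal output, with work bounded by len(values) instead of rows*cols.

-- ===== PORT A =====
def col_read_grid (values : List Int) (rows : Int) (cols : Int) : List Int :=
  (PySem.List.pyRange 0 cols).foldl (fun result c =>
    (PySem.List.pyRange 0 rows).foldl (fun result r =>
      let idx := r * cols + c
      if idx < (values.length : Int) then
        result ++ [PySem.List.pyGetD values idx 0]   -- values[idx]; idx is in range here
      else result) result) []

-- ===== PORT B =====
def col_read_grid_alt (values : List Int) (rows : Int) (cols : Int) : List Int :=
  if cols ≤ 0 then []
  else
    let buckets : List (List Int) := List.replicate (min cols (values.length : Int)).toNat []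
    let final := (PySem.List.pyRange 0 (values.length : Int)).foldl (fun buckets idx =>
      let r := PySem.Int.floordiv idx cols
      let c := PySem.Int.mod idx cols
      if r < rows then
        buckets.set c.toNat ((buckets.getD c.toNat []) ++ [PySem.List.pyGetD values idx 0])
      else buckets) buckets
    final.foldl (fun out col => out ++ col) []     -- for col in buckets: out.extend(col)

-- ===== PRECONDITION & SPEC =====
def Spec_col_read_grid (values : List Int) (rows : Int) (cols : Int) (out : List Int) : Prop := out = col_read_grid_alt values rows cols
instance (values : List Int) (rows : Int) (cols : Int) (out : List Int) : Decidable (Spec_col_read_grid values rows cols out) := by unfold Spec_col_read_grid; infer_instance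

-- ===== CLAIM (what is proved, stated in full; the proofs are below) =====
def Claim_equal_col_read_grid : Prop := ∀ (values : List Int) (rows : Int) (cols : Int), Dom_col_read_grid values rows cols → Spec_col_read_grid values rows cols (col_read_grid values rows cols)

-- ===== LEMMAS AND PROOFS =====

-- the column-`c` contribution after the first `m` values have been considered
def colA (values : List Int) (rowsN colsN m c : Nat) : List Int :=
  ((List.range rowsN).filter (fun r => decide (r * colsN + c < m))).map
    (fun r => values.getD (r * colsN + c) 0)

-- B's loop body, in Nat form
def stepB (values : List Int) (rowsN colsN : Nat) (buckets : List (List Int)) (idx : Nat) : List (List Int) :=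
  if idx / colsN < rowsN then
    buckets.set (idx % colsN) ((buckets.getD (idx % colsN) []) ++ [values.getD idx 0])
  else buckets

lemma pyRange_zero_toNat (m : Int) :
    PySem.List.pyRange 0 m = (List.range m.toNat).map (fun k : Nat => (k : Int)) := by
  by_cases h : 0 ≤ m
  · rw [show m = ((m.toNat : Nat) : Int) from (Int.toNat_of_nonneg h).symm]
    exact PySem.List.pyRange_zero_natCast m.toNat
  · have h0 : m.toNat = 0 := by omega
    rw [h0]
    simp [PySem.List.pyRange]
    omega

lemma filter_range_lt (a b : Nat) (h : a ≤ b) :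
    (List.range b).filter (fun r => decide (r < a)) = List.range a := by
  have hb : b = a + (b - a) := by omega
  rw [hb, List.range_add, List.filter_append]
  have h1 : (List.range a).filter (fun r => decide (r < a)) = List.range a := by
    apply List.filter_eq_self.mpr
    intro x hx
    simpa using List.mem_range.mp hx
  have h2 : ((List.range (b - a)).map (fun x => a + x)).filter (fun r => decide (r < a)) = [] := by
    apply List.filter_eq_nil_iff.mpr
    intro x hx
    simp only [List.mem_map, List.mem_range] at hx
    obtain ⟨y, _, rfl⟩ := hx
    simp
  rw [h1, h2, List.append_nil]

lemma mul_add_le_iff (colsN c r s : Nat) (hc : 0 < colsN) :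
    r * colsN + c ≤ s * colsN + c ↔ r ≤ s := by
  constructor
  · intro h
    by_contra hn
    have hs : s + 1 ≤ r := by omega
    have h1 : (s + 1) * colsN ≤ r * colsN := Nat.mul_le_mul hs (le_refl colsN)
    have h2 : (s + 1) * colsN = s * colsN + colsN := by ring
    have h3 : s * colsN + colsN ≤ r * colsN := by rw [← h2]; exact h1
    have h4 : r * colsN + c ≤ s * colsN + c := h
    nlinarith
  · intro h
    exact Nat.add_le_add_right (Nat.mul_le_mul h (le_refl colsN)) c

lemma mul_add_lt_iff (colsN c r s : Nat) (hc : 0 < colsN) :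
    r * colsN + c < s * colsN + c ↔ r < s := by
  rw [← Nat.not_le, ← Nat.not_le, not_iff_not]
  exact mul_add_le_iff colsN c s r hc

-- untouched columns: appending value m does not change column c
lemma colA_stable (values : List Int) (rowsN colsN m c : Nat) (hc : 0 < colsN)
    (hcc : c < colsN) (hne : m % colsN ≠ c ∨ rowsN ≤ m / colsN) :
    colA values rowsN colsN (m + 1) c = colA values rowsN colsN m c := by
  unfold colA
  congr 1
  apply List.filter_congr
  intro r hr
  have hrr : r < rowsN := List.mem_range.mp hr
  apply decide_eq_decide.mpr
  constructor
  · intro h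
    rcases Nat.lt_succ_iff_lt_or_eq.mp h with h' | h'
    · exact h'
    · exfalso
      have hmod : m % colsN = c := by
        rw [← h', show r * colsN + c = c + r * colsN from by ring,
            Nat.add_mul_mod_self_right]
        exact Nat.mod_eq_of_lt hcc
      have hdiv : m / colsN = r := by
        rw [← h', show r * colsN + c = c + r * colsN from by ring,
            Nat.add_mul_div_right _ _ hc, Nat.div_eq_of_lt hcc]
        simp
      rcases hne with h2 | h2
      · exact h2 hmod
      · rw [hdiv] at h2; omega
  · intro h; omega

-- the touched column gains exactly values[m] at its end
lemma colA_snoc (values : List Int) (rowsN colsN m : Nat) (hc : 0 < colsN)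
    (hr : m / colsN < rowsN) :
    colA values rowsN colsN (m + 1) (m % colsN)
      = colA values rowsN colsN m (m % colsN) ++ [values.getD m 0] := by
  have hcc : m % colsN < colsN := Nat.mod_lt _ hc
  have hm : m / colsN * colsN + m % colsN = m := by
    rw [Nat.mul_comm]; exact Nat.div_add_mod m colsN
  have f1 : ∀ r ∈ List.range rowsN,
      (decide (r * colsN + m % colsN < m + 1)) = (decide (r < m / colsN + 1)) := by
    intro r _
    apply decide_eq_decide.mpr
    rw [Nat.lt_succ_iff, Nat.lt_succ_iff]
    have h2 := mul_add_le_iff colsN (m % colsN) r (m / colsN) hc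
    rw [hm] at h2
    exact h2
  have f2 : ∀ r ∈ List.range rowsN,
      (decide (r * colsN + m % colsN < m)) = (decide (r < m / colsN)) := by
    intro r _
    apply decide_eq_decide.mpr
    have h2 := mul_add_lt_iff colsN (m % colsN) r (m / colsN) hc
    rw [hm] at h2
    exact h2
  unfold colA
  rw [List.filter_congr f1, List.filter_congr f2,
      filter_range_lt _ _ hr, filter_range_lt _ _ (le_of_lt hr),
      List.range_succ, List.map_append]
  simp [hm]

lemma stepB_inv (values : List Int) (rowsN colsN : Nat) (hc : 0 < colsN)
    (m : Nat) (hm : m < values.length) :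
    stepB values rowsN colsN
      ((List.range (min colsN values.length)).map (colA values rowsN colsN m)) m
      = (List.range (min colsN values.length)).map (colA values rowsN colsN (m + 1)) := by
  unfold stepB
  by_cases hr : m / colsN < rowsN
  · rw [if_pos hr]
    have hck : m % colsN < min colsN values.length :=
      lt_min (Nat.mod_lt _ hc) (lt_of_le_of_lt (Nat.mod_le _ _) hm)
    have hlen : m % colsN < ((List.range (min colsN values.length)).map
        (colA values rowsN colsN m)).length := by simpa using hck
    rw [List.getD_eq_getElem _ _ hlen]
    apply List.ext_getElem
    · simp
    · intro i h1 h2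
      simp only [List.length_set, List.length_map, List.length_range] at h1 h2
      rw [List.getElem_set]
      simp only [List.getElem_map, List.getElem_range]
      by_cases hi : m % colsN = i
      · rw [if_pos hi, ← hi]
        exact (colA_snoc values rowsN colsN m hc hr).symm
      · rw [if_neg hi]
        exact (colA_stable values rowsN colsN m i hc (lt_of_lt_of_le h2 (min_le_left _ _))
          (Or.inl hi)).symm
  · rw [if_neg hr]
    apply List.map_congr_left
    intro c hcm
    have hcc : c < colsN := lt_of_lt_of_le (List.mem_range.mp hcm) (min_le_left _ _)
    exact (colA_stable values rowsN colsN m c hc hcc (Or.inr (Nat.le_of_not_lt hr))).symm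

lemma B_loop (values : List Int) (rowsN colsN : Nat) (hc : 0 < colsN) :
    ∀ m, m ≤ values.length →
    (List.range m).foldl (stepB values rowsN colsN)
        (List.replicate (min colsN values.length) [])
      = (List.range (min colsN values.length)).map (colA values rowsN colsN m) := by
  intro m
  induction m with
  | zero =>
    intro _
    simp only [List.range_zero, List.foldl_nil]
    have h0 : ∀ c ∈ List.range (min colsN values.length),
        colA values rowsN colsN 0 c = ([] : List Int) := fun c _ => by simp [colA]
    rw [List.map_congr_left (g := fun _ => ([] : List Int)) h0]
    simp
  | succ m ih =>
    intro hm
    rw [List.range_succ, List.foldl_append, ih (by omega)]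
    simp only [List.foldl_cons, List.foldl_nil]
    exact stepB_inv values rowsN colsN hc m (by omega)

lemma A_eq (values : List Int) (rows : Int) (colsN : Nat) :
    col_read_grid values rows ↑colsN
      = (List.range colsN).flatMap (colA values rows.toNat colsN values.length) := by
  unfold col_read_grid
  rw [PySem.List.pyRange_zero_natCast, pyRange_zero_toNat]
  simp only [List.foldl_map, ← Nat.cast_mul, ← Nat.cast_add, Nat.cast_lt,
    PySem.List.pyGetD_natCast]
  have hinner : ∀ (acc : List Int) (c : Nat),
      List.foldl (fun (result : List Int) (r : Nat) =>
        if r * colsN + c < values.length then result ++ [values.getD (r * colsN + c) 0]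
        else result) acc (List.range rows.toNat)
      = acc ++ colA values rows.toNat colsN values.length c := by
    intro acc c
    rw [PySem.List.foldl_append_ite (p := fun r => r * colsN + c < values.length)
        (f := fun r => values.getD (r * colsN + c) 0)]
    rfl
  simp only [hinner]
  rw [PySem.List.foldl_append_eq_flatMap]
  rfl

lemma B_eq (values : List Int) (rows : Int) (colsN : Nat) (hc : 0 < colsN) :
    col_read_grid_alt values rows ↑colsN
      = (List.range (min colsN values.length)).flatMap
          (colA values rows.toNat colsN values.length) := by
  unfold col_read_grid_alt
  rw [if_neg (by omega : ¬ ((colsN : Int) ≤ 0))]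
  rw [pyRange_zero_toNat]
  simp only [List.foldl_map, PySem.Int.floordiv_natCast, PySem.Int.mod_natCast,
    PySem.List.pyGetD_natCast, ← Int.lt_toNat, ← Nat.cast_min, Int.toNat_natCast]
  show (List.foldl (stepB values rows.toNat colsN)
      (List.replicate (min colsN values.length) []) (List.range values.length)).foldl
      (fun out col => out ++ col) [] = _
  rw [B_loop values rows.toNat colsN hc values.length (le_refl _),
      PySem.List.foldl_append_eq_flatten, List.nil_append, ← List.flatMap_def]

lemma flatMap_range_eq_of_nil (f : Nat → List Int) (k K : Nat) (hkK : k ≤ K)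
    (h : ∀ c, k ≤ c → c < K → f c = []) :
    (List.range K).flatMap f = (List.range k).flatMap f := by
  obtain ⟨j, rfl⟩ : ∃ j, K = k + j := ⟨K - k, by omega⟩
  rw [List.range_add, List.flatMap_append]
  have h2 : ((List.range j).map (fun x => k + x)).flatMap f = [] := by
    apply List.flatMap_eq_nil_iff.mpr
    intro x hx
    simp only [List.mem_map, List.mem_range] at hx
    obtain ⟨y, hy, rfl⟩ := hx
    exact h _ (Nat.le_add_right _ _) (by omega)
  rw [h2, List.append_nil]

lemma colA_nil_of_ge (values : List Int) (rowsN colsN c : Nat)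
    (hcn : values.length ≤ c) :
    colA values rowsN colsN values.length c = [] := by
  unfold colA
  have hf : (List.range rowsN).filter (fun r => decide (r * colsN + c < values.length)) = [] := by
    apply List.filter_eq_nil_iff.mpr
    intro r _
    simp only [decide_eq_true_eq]
    exact Nat.not_lt.mpr (le_trans hcn (Nat.le_add_left c _))
  rw [hf]
  rfl

-- ===== VERDICT (by name: the statement is the Claim_ definition above) =====
theorem col_read_grid_spec : Claim_equal_col_read_grid := by
  intro values rows cols _dom
  unfold Spec_col_read_grid
  by_cases hcols : cols ≤ 0
  · unfold col_read_grid col_read_grid_alt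
    rw [if_pos hcols]
    have hnil : PySem.List.pyRange 0 cols = [] := by
      rw [pyRange_zero_toNat]
      have h0 : cols.toNat = 0 := by omega
      rw [h0]
      rfl
    rw [hnil]
    rfl
  · have hpos : 0 < cols := by omega
    obtain ⟨colsN, rfl⟩ : ∃ k : Nat, cols = ↑k := ⟨cols.toNat, by omega⟩
    have hc : 0 < colsN := by exact_mod_cast hpos
    rw [A_eq values rows colsN, B_eq values rows colsN hc]
    apply flatMap_range_eq_of_nil _ _ _ (min_le_left _ _)
    intro c hck hcK
    by_cases h : colsN ≤ values.length
    · omega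
    · exact colA_nil_of_ge values rows.toNat colsN c (by omega)
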